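-- pv_equiv track=rewrite | github.com/FranciscoOrtuzar/calculadora-orca-app | Limpieza de datos/limpieza_fact_vol.py | forward_fill_row
-- ===== SOURCE A (Python) =====
-- import unicodedata
-- from typing import Optional, Tuple, List, Dict
--
-- def norm(s: str) -> str:
--     if s is None: return ""
--     s = str(s)
--     s = unicodedata.normalize("NFKD", s).encode("ascii","ignore").decode("ascii")
--     return s.strip()
--
-- def forward_fill_row(values: List[str]) -> List[str]:
--     """Propaga a la derecha (sirve para merges en Excel)."""
--     out = []
--     last = ""
--     for v in values:
--         vv = norm(v)
--         if vv == "" or vv.lower() in {"nan","none"}: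
--             out.append(last)
--         else:
--             out.append(vv)
--             last = vv
--     return out
-- ===== SOURCE B (Python) =====
-- import unicodedata
-- from typing import List
--
-- def norm(s: str) -> str:
--     if s is None: return ""
--     s = str(s)
--     s = unicodedata.normalize("NFKD", s).encode("ascii","ignore").decode("ascii")
--     return s.strip()
--
-- def forward_fill_row(values: List[str]) -> List[str]:
--     """Propaga a la derecha: expand the gaps between valid cells as segments."""
--     normed = [norm(v) for v in values]
--     valid = [(i, vv) for i, vv in enumerate(normed)
--              if vv != "" and vv.lower() not in ("nan", "none")]
--     out = []
--     prev, prev_i = "", 0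
--     for i, vv in valid:
--         out += [prev] * (i - prev_i)
--         out.append(vv)
--         prev, prev_i = vv, i + 1
--     out += [prev] * (len(values) - prev_i)
--     return out
-- ===== Notes on version B (the rewrite author's own statement) =====
-- stated objective: alternative
-- what changed: A mutates a 'last' variable while appending one element per iteration; B first normalizes all cells, extracts the (index, value) list of valid cells, and builds the output by expanding the gap before each valid cell as a replicated block of the previous valid value.
import Mathlib
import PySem

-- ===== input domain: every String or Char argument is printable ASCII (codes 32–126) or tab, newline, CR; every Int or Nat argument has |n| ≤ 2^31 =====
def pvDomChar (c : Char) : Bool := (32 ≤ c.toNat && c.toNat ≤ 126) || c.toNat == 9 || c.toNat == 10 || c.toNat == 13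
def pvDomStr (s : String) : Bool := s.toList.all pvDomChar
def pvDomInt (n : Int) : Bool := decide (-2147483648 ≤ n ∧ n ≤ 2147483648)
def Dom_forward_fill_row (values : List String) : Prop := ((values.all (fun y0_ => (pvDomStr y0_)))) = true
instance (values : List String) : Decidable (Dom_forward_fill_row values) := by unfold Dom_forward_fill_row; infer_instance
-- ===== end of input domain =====

-- B replaces A's per-element state-mutating loop by a segment expansion over the list of valid
-- (index, value) cells, filling each gap with a replicated block; same O(n) cost, alternative algorithm.


-- ===== PORT A =====
-- norm: NFKD-normalize, drop non-ASCII, strip.  On the ASCII domain (Dom_) NFKD and the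
-- ascii round-trip are the identity, so norm is exactly str.strip there (exact via PySem.Str.strip).
def pvNorm (s : String) : String := PySem.Str.strip s

def stepA (st : List String × String) (v : String) : List String × String :=
  let vv := pvNorm v
  if vv == "" || PySem.Str.lower vv == "nan" || PySem.Str.lower vv == "none" then
    (st.1 ++ [st.2], st.2)
  else
    (st.1 ++ [vv], vv)

def forward_fill_row (values : List String) : List String :=
  (values.foldl stepA (([] : List String), "")).1

-- ===== PORT B =====
def pvValid (vv : String) : Bool :=
  !(vv == "") && !(PySem.Str.lower vv == "nan") && !(PySem.Str.lower vv == "none")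

def stepB (st : List String × String × Int) (p : Int × String) : List String × String × Int :=
  (st.1 ++ PySem.List.pyRepeat [st.2.1] (p.1 - st.2.2) ++ [p.2], p.2, p.1 + 1)

def forward_fill_row_alt (values : List String) : List String :=
  let normed := values.map pvNorm
  let valid := (PySem.List.enumerate normed 0).filter (fun p => pvValid p.2)
  let st := valid.foldl stepB (([] : List String), "", (0 : Int))
  st.1 ++ PySem.List.pyRepeat [st.2.1] ((values.length : Int) - st.2.2)

-- ===== PRECONDITION & SPEC =====
def Spec_forward_fill_row (values : List String) (out : List String) : Prop := out = forward_fill_row_alt values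
instance (values : List String) (out : List String) : Decidable (Spec_forward_fill_row values out) := by unfold Spec_forward_fill_row; infer_instance

-- ===== CLAIM (what is proved, stated in full; the proofs are below) =====
def Claim_equal_forward_fill_row : Prop := ∀ (values : List String), Dom_forward_fill_row values → Spec_forward_fill_row values (forward_fill_row values)

-- ===== LEMMAS AND PROOFS =====

-- A's loop in recursive form, over already-normalized values
def ffA : List String → String → List String
  | [], _ => []
  | vv :: ws, last =>
    if pvValid vv then vv :: ffA ws vv else last :: ffA ws last

-- B's segment expansion in recursive form (n = total length as Int)
def segB : List (Int × String) → String → Int → Int → List String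
  | [], prev, prevI, n => List.replicate (n - prevI).toNat prev
  | (i, vv) :: rest, prev, prevI, n =>
      List.replicate (i - prevI).toNat prev ++ vv :: segB rest vv (i + 1) n

lemma ffA_cons (vv : String) (ws : List String) (last : String) :
    ffA (vv :: ws) last = if pvValid vv then vv :: ffA ws vv else last :: ffA ws last := rfl

-- A's branch test is the negation of B's validity test
lemma cond_eq_not_valid (vv : String) :
    (vv == "" || PySem.Str.lower vv == "nan" || PySem.Str.lower vv == "none") = !pvValid vv := by
  cases h1 : (vv == "") <;> cases h2 : (PySem.Str.lower vv == "nan")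
    <;> cases h3 : (PySem.Str.lower vv == "none") <;> simp [pvValid, h1, h2, h3]

lemma stepA_eq (out : List String) (last v : String) :
    stepA (out, last) v =
      if pvValid (pvNorm v) then (out ++ [pvNorm v], pvNorm v) else (out ++ [last], last) := by
  rw [stepA]
  simp only [cond_eq_not_valid]
  cases h : pvValid (pvNorm v)
  · simp
  · simp

lemma foldA_eq (vs : List String) (out : List String) (last : String) :
    (vs.foldl stepA (out, last)).1 = out ++ ffA (vs.map pvNorm) last := by
  induction vs generalizing out last with
  | nil => simp [ffA]
  | cons v vs ih =>
    rw [List.foldl_cons, stepA_eq, List.map_cons, ffA_cons]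
    cases h : pvValid (pvNorm v)
    · simp [ih]
    · simp [ih]

lemma foldB_eq (L : List (Int × String)) (out : List String) (prev : String) (prevI n : Int) :
    ((L.foldl stepB (out, prev, prevI)).1
      ++ PySem.List.pyRepeat [(L.foldl stepB (out, prev, prevI)).2.1]
          (n - (L.foldl stepB (out, prev, prevI)).2.2))
    = out ++ segB L prev prevI n := by
  induction L generalizing out prev prevI with
  | nil => simp [segB, PySem.List.pyRepeat_singleton]
  | cons p rest ih =>
    obtain ⟨i, vv⟩ := p
    rw [List.foldl_cons, segB,
      show stepB (out, prev, prevI) (i, vv)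
          = (out ++ PySem.List.pyRepeat [prev] (i - prevI) ++ [vv], vv, i + 1) from rfl, ih]
    simp [PySem.List.pyRepeat_singleton]

lemma segB_shift (L : List (Int × String)) (prev : String) (k n : Int)
    (hL : ∀ p ∈ L, k < p.1) (hn : k < n) :
    segB L prev k n = prev :: segB L prev (k + 1) n := by
  cases L with
  | nil =>
    simp only [segB]
    have h1 : (n - k).toNat = (n - (k + 1)).toNat + 1 := by omega
    rw [h1, List.replicate_succ]
  | cons p rest =>
    obtain ⟨i, vv⟩ := p
    have hk : k < i := hL (i, vv) (List.mem_cons_self ..)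
    simp only [segB]
    have h1 : (i - k).toNat = (i - (k + 1)).toNat + 1 := by omega
    rw [h1, List.replicate_succ]
    simp

lemma key (ws : List String) (last : String) (k : Int) :
    ffA ws last
      = segB ((PySem.List.enumerate ws k).filter (fun p => pvValid p.2))
          last k (k + ws.length) := by
  induction ws generalizing last k with
  | nil =>
    simp only [ffA, PySem.List.enumerate_nil, List.filter_nil, segB, List.length_nil]
    norm_num
  | cons vv ws ih =>
    have hlen : k + ((vv :: ws).length : Int) = (k + 1) + (ws.length : Int) := by
      simp only [List.length_cons]
      push_cast
      omega
    rw [PySem.List.enumerate_cons, List.filter_cons, hlen]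
    cases h : pvValid vv with
    | true =>
      simp only [ffA, h, if_pos]
      rw [segB, ih vv (k + 1)]
      simp only [sub_self, Int.toNat_zero, List.replicate_zero, List.nil_append]
    | false =>
      simp only [ffA, h, if_neg, Bool.false_eq_true, not_false_iff]
      have hL : ∀ p ∈ (PySem.List.enumerate ws (k + 1)).filter (fun p => pvValid p.2),
          k < p.1 := by
        intro p hp
        have hp' := List.mem_of_mem_filter hp
        rw [PySem.List.mem_enumerate_iff] at hp'
        obtain ⟨j, hj, rfl⟩ := hp'
        omega
      rw [segB_shift _ _ _ _ hL (by omega)]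
      rw [ih last (k + 1)]

-- ===== VERDICT (by name: the statement is the Claim_ definition above) =====
theorem forward_fill_row_spec : Claim_equal_forward_fill_row := by
  intro values _
  unfold Spec_forward_fill_row forward_fill_row forward_fill_row_alt
  rw [foldA_eq, key (values.map pvNorm) "" 0]
  simp only [zero_add, List.length_map]
  rw [← foldB_eq ((PySem.List.enumerate (values.map pvNorm) 0).filter (fun p => pvValid p.2))
        [] "" 0 (values.length : Int)]
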